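-- pv_equiv track=rewrite | github.com/Yamyee/pyOCAnalyze | analyzeInterface.py | filterPureName
-- ===== SOURCE A (Python) =====
-- seps = [" ","{","\n","\t"]
--
-- def filterPureName(line):
--     i = 0
--     name = ''
--     while i < len(line):
--         if line[i] == ' ':
--             if name == '':
--                 i += 1
--                 continue
--             else:
--                 break
--         elif line[i] not in seps:
--             name += line[i]
--         else:
--             break
--
--         i += 1
--     return name
-- ===== SOURCE B (Python) =====
-- def filterPureName(line):
--     s = line.lstrip(' ')
--     idx = next((i for i, c in enumerate(s) if c in " {\n\t"), len(s))
--     return s[:idx]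
-- ===== Notes on version B (the rewrite author's own statement) =====
-- stated objective: simpler
-- what changed: Replaced A's single interleaved skip/accumulate/break while-loop that builds the name by repeated string concatenation with a two-phase strip of leading spaces followed by a first-separator find and one slice; this also removes the quadratic concatenation cost.
import Mathlib
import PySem

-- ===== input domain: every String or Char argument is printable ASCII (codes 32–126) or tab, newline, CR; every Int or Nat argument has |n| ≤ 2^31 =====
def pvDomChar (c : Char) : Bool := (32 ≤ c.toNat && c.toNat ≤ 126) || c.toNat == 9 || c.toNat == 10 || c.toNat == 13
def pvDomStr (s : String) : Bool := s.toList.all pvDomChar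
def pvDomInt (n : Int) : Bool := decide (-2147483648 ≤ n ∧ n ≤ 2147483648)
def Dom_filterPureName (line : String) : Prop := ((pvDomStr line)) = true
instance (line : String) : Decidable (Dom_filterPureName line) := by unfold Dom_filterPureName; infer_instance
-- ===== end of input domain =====

-- B replaces A's single interleaved skip/accumulate/break loop by a strip of leading
-- spaces followed by a first-separator find and one slice (objective: simpler; intended faster since A concatenates char-by-char).

-- ===== PORT A =====
def pvSeps : List Char := [' ', '{', '\n', '\t']

-- the while loop of A: state = (remaining chars, accumulated name)
def pvLoopA : List Char → List Char → List Char
  | [], name => name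
  | c :: rest, name =>
    if c = ' ' then
      if name = [] then pvLoopA rest name else name
    else if c ∉ pvSeps then pvLoopA rest (name ++ [c])
    else name

def filterPureName (line : String) : String := String.ofList (pvLoopA line.toList [])

-- ===== PORT B =====
-- s = line.lstrip(' ')  (strips only ' ', hand-ported as dropWhile; exact since only ' ' is stripped)
-- idx = first index of a separator, else len(s); return s[:idx]
def filterPureName_alt (line : String) : String :=
  let s := line.toList.dropWhile (· = ' ')
  let idx := (s.findIdx? (fun c => c ∈ pvSeps)).getD s.length
  String.ofList (s.take idx)

-- ===== PRECONDITION & SPEC =====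
def Spec_filterPureName (line : String) (out : String) : Prop := out = filterPureName_alt line
instance (line : String) (out : String) : Decidable (Spec_filterPureName line out) := by unfold Spec_filterPureName; infer_instance

-- ===== CLAIM (what is proved, stated in full; the proofs are below) =====
def Claim_equal_filterPureName : Prop := ∀ (line : String), Dom_filterPureName line → Spec_filterPureName line (filterPureName line)

-- ===== LEMMAS AND PROOFS =====

-- B's find-then-slice equals takeWhile of the non-separator predicate
theorem pv_take_findIdx (p : Char → Bool) (l : List Char) :
    l.take ((l.findIdx? p).getD l.length) = l.takeWhile (fun c => !p c) := by
  induction l with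
  | nil => rfl
  | cons c rest ih =>
    by_cases h : p c
    · simp [List.findIdx?_cons, h]
    · simp only [List.findIdx?_cons, h, Bool.false_eq_true, if_false]
      cases hf : rest.findIdx? p <;>
        simp [h] <;> rw [← ih, hf] <;> simp

-- accumulation phase of A's loop: once name is nonempty, A appends until the first separator
theorem pv_loopA_acc (l name : List Char) (h : name ≠ []) :
    pvLoopA l name = name ++ l.takeWhile (fun c => !(decide (c ∈ pvSeps))) := by
  induction l generalizing name with
  | nil => simp [pvLoopA]
  | cons c rest ih =>
    by_cases hc : c = ' '
    · subst hc
      simp [pvLoopA, h, List.takeWhile, pvSeps]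
    · by_cases hs : c ∈ pvSeps
      · simp [pvLoopA, hc, hs, List.takeWhile]
      · rw [pvLoopA]
        simp only [if_neg hc, if_pos hs]
        rw [ih _ (by simp)]
        simp [List.takeWhile, hs]

-- skip phase of A's loop equals lstrip(' ') followed by the accumulation
theorem pv_loopA_nil (l : List Char) :
    pvLoopA l [] = (l.dropWhile (· = ' ')).takeWhile (fun c => !(decide (c ∈ pvSeps))) := by
  induction l with
  | nil => rfl
  | cons c rest ih =>
    by_cases hc : c = ' '
    · subst hc
      simpa [pvLoopA, List.dropWhile] using ih
    · rw [List.dropWhile_cons_of_neg (by simpa using hc)]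
      by_cases hs : c ∈ pvSeps
      · simp [pvLoopA, hc, hs, List.takeWhile]
      · rw [pvLoopA]
        simp only [if_neg hc, if_pos hs]
        rw [pv_loopA_acc _ _ (by simp)]
        simp [List.takeWhile, hs]

-- ===== VERDICT (by name: the statement is the Claim_ definition above) =====
theorem filterPureName_spec : Claim_equal_filterPureName := by
  intro line _
  unfold Spec_filterPureName filterPureName filterPureName_alt
  rw [pv_loopA_nil]
  exact congrArg String.ofList (pv_take_findIdx _ _).symm
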